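-- pv_equiv track=rewrite | github.com/SAMKE-glitch/Daft_codes | sn1/sn2/THTTJAVA/getLongestString.py | getLongestString
-- ===== SOURCE A (Python) =====
-- from typing import List
--
-- def getLongestString(characters: str, strings: List[str]) -> str:
--
--     # HELPER FUNCTION:
--     valid_set = set(characters) # for faster lookup
--
--     def is_valid(s):
--         # check only valid characters
--
--         for ch in s:
--             if ch not in valid_set:
--                 return False
--
--         # check no consecutive duplicates edge case
--         for i in range(1, len(s)):
--             if s[i] == s[i -1]:
--                 return False
--         return True
--
--     # FILTER VALID STRINGS
--     validStrings = [s for s in strings if is_valid(s)]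
--
--     # return the longest valid string
--     if not validStrings:
--         return None
--     return max(validStrings, key=len)
-- ===== SOURCE B (Python) =====
-- from typing import List
--
-- def getLongestString(characters: str, strings: List[str]) -> str:
--     # Sort-then-scan: order candidates by length descending (stable, so the
--     # original order is kept among equal lengths, matching max's first-longest
--     # tie-break) and return the first valid one; validity is a subset test plus
--     # an adjacent-pair check over zip(s, s[1:]).
--     valid = set(characters)
--     for s in sorted(strings, key=len, reverse=True):
--         if set(s) <= valid and all(a != b for a, b in zip(s, s[1:])):
--             return s
--     return None
-- ===== Notes on version B (the rewrite author's own statement) =====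
-- stated objective: alternative
-- what changed: Instead of A's filter-all-then-max, B stably sorts the candidates by length descending and returns the first that passes a subset test set(s)<=valid plus an adjacent-pair zip(s,s[1:]) check; stability makes the first valid string in that order exactly A's max(key=len) over the valid ones, and the C-level set/zip checks replace A's per-character Python loops.
import Mathlib
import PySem

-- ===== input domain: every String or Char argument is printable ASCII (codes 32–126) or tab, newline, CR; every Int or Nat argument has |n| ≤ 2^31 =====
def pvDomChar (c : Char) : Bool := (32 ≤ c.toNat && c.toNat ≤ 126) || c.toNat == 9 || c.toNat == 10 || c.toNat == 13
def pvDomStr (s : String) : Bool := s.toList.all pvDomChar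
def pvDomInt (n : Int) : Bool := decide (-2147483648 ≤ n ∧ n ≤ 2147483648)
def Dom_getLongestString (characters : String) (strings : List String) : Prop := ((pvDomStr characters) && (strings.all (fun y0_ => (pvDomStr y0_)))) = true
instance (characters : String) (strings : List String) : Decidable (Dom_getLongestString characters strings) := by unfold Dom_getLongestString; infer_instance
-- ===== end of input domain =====

-- B replaces A's filter-then-max with a stable length-descending sort scanned for the first valid string (alternative decomposition, same results).

-- ===== PORT A =====
-- is_valid: first loop = every char in valid_set; second loop = no s[i] == s[i-1] for i in range(1, len(s))
def pvIsValidA (vs : PySem.Set Char) (s : String) : Bool :=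
  (s.toList.all (fun ch => PySem.Set.contains vs ch)) &&
  ((PySem.List.pyRange 1 (PySem.Str.len s) 1).all (fun i =>
      !(PySem.List.pyGetD s.toList i ' ' == PySem.List.pyGetD s.toList (i - 1) ' ')))

def getLongestString (characters : String) (strings : List String) : Option String :=
  let validSet := PySem.Set.ofList characters.toList
  let validStrings := strings.filter (fun s => pvIsValidA validSet s)
  if validStrings.isEmpty then none
  else PySem.List.max? validStrings (fun s => PySem.Str.len s)

-- ===== PORT B =====
-- 'set(s) <= valid and all(a != b for a, b in zip(s, s[1:]))'
def pvIsValidB (valid : PySem.Set Char) (s : String) : Bool :=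
  PySem.Set.issubset (PySem.Set.ofList s.toList) valid &&
  ((s.toList.zip (PySem.List.slice s.toList (some 1) none)).all (fun pr => pr.1 != pr.2))

-- 'for s in sorted(strings, key=len, reverse=True): if …: return s' / 'return None'
def getLongestString_alt (characters : String) (strings : List String) : Option String :=
  let valid := PySem.Set.ofList characters.toList
  (PySem.List.sorted strings (fun s => PySem.Str.len s) true).find?
    (fun s => pvIsValidB valid s)

-- ===== PRECONDITION & SPEC =====
def Spec_getLongestString (characters : String) (strings : List String) (out : Option String) : Prop := out = getLongestString_alt characters strings
instance (characters : String) (strings : List String) (out : Option String) : Decidable (Spec_getLongestString characters strings out) := by unfold Spec_getLongestString; infer_instance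

-- ===== CLAIM (what is proved, stated in full; the proofs are below) =====
def Claim_equal_getLongestString : Prop := ∀ (characters : String) (strings : List String), Dom_getLongestString characters strings → Spec_getLongestString characters strings (getLongestString characters strings)

-- ===== LEMMAS AND PROOFS =====

-- proof-only helper: "no consecutive duplicates, given the previous character"
def pvNoDup : Option Char → List Char → Bool
  | _, [] => true
  | prev, c :: t => (prev != some c) && pvNoDup (some c) t

-- B's zip(s, s[1:]) adjacent check equals pvNoDup with the head as previous char
theorem pvZip_noDup (t : List Char) :
    ∀ a, ((a :: t).zip t).all (fun pr => pr.1 != pr.2) = pvNoDup (some a) t := by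
  induction t with
  | nil => intro a; simp [pvNoDup]
  | cons b t' ih =>
      intro a
      simp only [List.zip_cons_cons, List.all_cons, pvNoDup, ih b]
      cases h : a == b <;> simp_all [bne]

theorem pvAdj_cons (l : List Char) :
    ∀ a : Char, ((List.range l.length).all
        (fun k => !(l.getD k ' ' == (a :: l).getD k ' '))) = pvNoDup (some a) l := by
  induction l with
  | nil => intro a; simp [pvNoDup]
  | cons b t ih =>
      intro a
      rw [List.length_cons, List.range_succ_eq_map]
      simp only [List.all_cons, List.all_map, Function.comp_def, List.getD_cons_zero,
        List.getD_cons_succ]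
      rw [show ((List.range t.length).all
            fun k => !(t.getD k ' ' == (b :: t).getD k ' ')) = pvNoDup (some b) t from ih b]
      simp only [pvNoDup, bne]
      congr 1
      congr 1
      simp [Bool.beq_comm]

-- A's range-based adjacent check equals pvNoDup from no previous char
theorem pvAdj_eq (l : List Char) :
    ((PySem.List.pyRange 1 (l.length : Int) 1).all (fun i =>
        !(PySem.List.pyGetD l i ' ' == PySem.List.pyGetD l (i - 1) ' '))) = pvNoDup none l := by
  cases l with
  | nil => simp [PySem.List.pyRange_one_eq_nil, pvNoDup]
  | cons a t =>
      rw [PySem.List.pyRange_one]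
      simp only [List.all_map, Function.comp_def]
      have hlen : ((((a :: t).length : Int) - 1)).toNat = t.length := by simp
      rw [hlen]
      have key : ∀ k : Nat, (!(PySem.List.pyGetD (a :: t) (1 + (k : Int)) ' ' ==
            PySem.List.pyGetD (a :: t) (1 + (k : Int) - 1) ' '))
          = (!(t.getD k ' ' == (a :: t).getD k ' ')) := by
        intro k
        have h2 : (1 + (k : Int) - 1) = ((k : Nat) : Int) := by omega
        have h1 : (1 + (k : Int)) = ((k + 1 : Nat) : Int) := by omega
        rw [h2, h1, PySem.List.pyGetD_natCast, PySem.List.pyGetD_natCast]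
        simp
      simp only [key]
      rw [show (List.all (List.range t.length) fun k => !(t.getD k ' ' == (a :: t).getD k ' '))
        = pvNoDup (some a) t from pvAdj_cons t a]
      simp [pvNoDup]

-- the two validity predicates agree
theorem pvValid_eq (vs : PySem.Set Char) (s : String) :
    pvIsValidA vs s = pvIsValidB vs s := by
  unfold pvIsValidA pvIsValidB
  simp only [PySem.Str.len]
  rw [pvAdj_eq]
  have hsub : PySem.Set.issubset (PySem.Set.ofList s.toList) vs
      = s.toList.all (fun ch => PySem.Set.contains vs ch) := by
    simp only [PySem.Set.issubset]
    rcases h : s.toList.all (fun ch => PySem.Set.contains vs ch) with _ | _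
    · simp only [List.all_eq_false] at h ⊢
      obtain ⟨x, hx, hc⟩ := h
      exact ⟨x, (PySem.Set.mem_ofList _ _).mpr hx, hc⟩
    · simp only [List.all_eq_true] at h ⊢
      intro x hx
      exact h x ((PySem.Set.mem_ofList _ _).mp hx)
  rw [hsub]
  congr 1
  have hslice : PySem.List.slice s.toList (some 1) none = s.toList.tail := by
    simp [pysem]
  rw [hslice]
  cases s.toList with
  | nil => simp [pvNoDup]
  | cons a t => rw [List.tail_cons, pvZip_noDup t a]; simp [pvNoDup]

-- first p-element after stably inserting x into a length-descending list
theorem pvFind_insert {α : Type} (key : α → Int) (p : α → Bool) (x : α) (l : List α)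
    (hs : l.Pairwise (fun a b => key b ≤ key a)) :
    (PySem.List.insertBy (fun a b => decide (key b < key a)) x l).find? p =
      match l.find? p with
      | none => if p x then some x else none
      | some m => if p x && decide (key m < key x) then some x else some m := by
  induction l with
  | nil => cases hp : p x <;> simp [PySem.List.insertBy, List.find?, hp]
  | cons y t ih =>
      have hsy : ∀ z ∈ t, key z ≤ key y := (List.pairwise_cons.mp hs).1
      have hst : t.Pairwise (fun a b => key b ≤ key a) := (List.pairwise_cons.mp hs).2
      simp only [PySem.List.insertBy]
      by_cases hxy : key y < key x
      · rw [if_pos (by simpa using hxy)]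
        cases hp : p x
        · rw [List.find?_cons_of_neg (by simp [hp])]
          cases hf : (y :: t).find? p with
          | none => simp
          | some m => simp
        · rw [List.find?_cons_of_pos (by simp [hp])]
          cases hf : (y :: t).find? p with
          | none => simp
          | some m =>
              have hm : m ∈ y :: t := List.mem_of_find?_eq_some hf
              have hle : key m ≤ key y := by
                rcases List.mem_cons.mp hm with h | h
                · exact h ▸ le_refl _
                · exact hsy m h
              have hlt : key m < key x := lt_of_le_of_lt hle hxy
              simp [hlt]
      · rw [if_neg (by simpa using hxy)]
        cases hpy : p y
        · rw [List.find?_cons_of_neg (by simp [hpy]), List.find?_cons_of_neg (by simp [hpy])]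
          exact ih hst
        · rw [List.find?_cons_of_pos (by simp [hpy]), List.find?_cons_of_pos (by simp [hpy])]
          simp [hxy]

-- first valid in the stable length-descending sort = running first-max over the filtered list
theorem pvSorted_find {α : Type} (key : α → Int) (p : α → Bool) (xs : List α) :
    (PySem.List.sorted xs key true).find? p = PySem.List.max? (xs.filter p) key := by
  induction xs using List.reverseRecOn with
  | nil => simp [PySem.List.sorted, PySem.List.max?]
  | append_singleton xs x ih =>
      have hsnoc : PySem.List.sorted (xs ++ [x]) key true
          = PySem.List.insertBy (fun a b => decide (key b < key a)) x
              (PySem.List.sorted xs key true) := by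
        rw [PySem.List.sorted_rev_eq_foldl_insertBy, PySem.List.sorted_rev_eq_foldl_insertBy,
          List.foldl_append]
        rfl
      rw [hsnoc, pvFind_insert key p x _ (PySem.List.sorted_pairwise_rev xs key), ih]
      unfold PySem.List.max?
      rw [List.filter_append, List.foldl_append]
      cases hp : p x
      · simp only [List.filter_cons, hp, List.filter_nil]
        cases hf : List.foldl _ none (xs.filter p) <;> simp
      · simp only [List.filter_cons, hp, List.filter_nil]
        cases List.foldl _ none (xs.filter p) with
        | none => simp
        | some m => simp only [Bool.true_and]; cases h : decide (key m < key x) <;> simp_all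

-- ===== VERDICT (by name: the statement is the Claim_ definition above) =====
theorem getLongestString_spec : Claim_equal_getLongestString := by
  unfold Claim_equal_getLongestString
  intro characters strings _
  unfold Spec_getLongestString getLongestString getLongestString_alt
  simp only
  rw [pvSorted_find]
  have hpred : (fun s => pvIsValidB (PySem.Set.ofList characters.toList) s)
      = (fun s => pvIsValidA (PySem.Set.ofList characters.toList) s) := by
    funext s; rw [pvValid_eq]
  rw [hpred]
  cases hL : strings.filter (fun s => pvIsValidA (PySem.Set.ofList characters.toList) s) with
  | nil => simp [PySem.List.max?]
  | cons h t => simp
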